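/- GENERATED by farm/mkstatement.py from design/units.tsv (unit `iter_54`) and the Specs of Vorbis/Spec/*.lean — do not edit.
   THE STATEMENT of the proof unit `iter_54`: the function `iter_54` (80 instructions) satisfies its contract,
   given the contracts of its callees. What the names mean: Vorbis/Spec/Basic.lean. The theorem to prove:
   `theorem iter_54_ok : Vorbis.Spec.iter_54.Statement`. -/
import Vorbis.Spec.Mdct
namespace Vorbis.Spec.iter_54
open X86 X86.User Asan

/-- The statement of unit `iter_54`. -/
def Statement : Prop :=
  ∀ (Lay : Layout) (_hLay : Lay.hi = 0x1000000) (μ : Microarch) (_hμ : UserX.MicroOK μ) (u₀ : State)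
    (_hcode : HasCodeNat Lay u₀ Vorbis.L.iter_54.entry Vorbis.Code.code_iter_54.nat Vorbis.L.iter_54.size)
    (_h_asan_load4_noabort : Asan.SmallCheck Lay μ Vorbis.WayInv (Vorbis.CodeOK u₀) [.rax, .rcx, .rdx] 4 Vorbis.L.__asan_load4_noabort.entry),
    ∀ (others : List Obj) (frames : List (Nat × FrameLayout)), Calls Lay μ Vorbis.WayInv (Vorbis.conv u₀) Vorbis.L.iter_54.entry (Vorbis.Spec.iter_54.spec others frames)

end Vorbis.Spec.iter_54
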